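-- pv_equiv track=rewrite | github.com/Jairaj1234-dancer/hex-ttt-nn | replay_viewer.py | get_move_info
-- ===== SOURCE A (Python) =====
-- from typing import Dict, List, Tuple
--
-- def get_move_info(move_idx: int, moves: List[Tuple[int, int]], rules: dict) -> dict:
--     """Get player, turn, and sub-move info for a given move index."""
--     current_player = 1
--     moves_remaining = rules.get("first_turn_stones", 1)
--     normal_stones = rules.get("normal_turn_stones", 2)
--     turn = 1
--
--     for i in range(move_idx):
--         moves_remaining -= 1
--         if moves_remaining == 0:
--             current_player = 3 - current_player
--             moves_remaining = normal_stones
--             turn += 1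
--
--     total_this_turn = rules["first_turn_stones"] if turn == 1 else normal_stones
--     sub_move = total_this_turn - moves_remaining + 1
--
--     return {
--         "player": current_player,
--         "turn": turn,
--         "sub_move": sub_move,
--         "total_sub_moves": total_this_turn,
--     }
-- ===== SOURCE B (Python) =====
-- def get_move_info(move_idx, moves, rules):
--     """Get player, turn, and sub-move info for a given move index (closed-form arithmetic)."""
--     first = rules.get("first_turn_stones", 1)
--     normal = rules.get("normal_turn_stones", 2)
--     if move_idx < first:
--         return {
--             "player": 1,
--             "turn": 1,
--             "sub_move": move_idx + 1,
--             "total_sub_moves": first,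
--         }
--     turns_done, sub = divmod(move_idx - first, normal)
--     return {
--         "player": 2 - turns_done % 2,
--         "turn": turns_done + 2,
--         "sub_move": sub + 1,
--         "total_sub_moves": normal,
--     }
-- ===== Notes on version B (the rewrite author's own statement) =====
-- stated objective: faster
-- what changed: Replaced the move-by-move simulation loop with closed-form divmod arithmetic on move_idx; Pre_ restricts to the natural rule domain (nonnegative move_idx, stone counts at least 1, and 'first_turn_stones' present whenever the result is still in turn 1), outside which A either raises KeyError or returns accidental stuck-loop values while B's divmod would divide by zero or floor-divide negatives.
-- crash fix: When 'first_turn_stones' is missing from rules and move_idx <= 0 (the result would still be in turn 1), A raises KeyError on rules["first_turn_stones"]; B returns the dict computed with the default first_turn_stones=1. — e.g. on get_move_info(0, [], []): A raises KeyError, B returns [("player", 1), ("turn", 1), ("sub_move", 1), ("total_sub_moves", 1)]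
import Mathlib
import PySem

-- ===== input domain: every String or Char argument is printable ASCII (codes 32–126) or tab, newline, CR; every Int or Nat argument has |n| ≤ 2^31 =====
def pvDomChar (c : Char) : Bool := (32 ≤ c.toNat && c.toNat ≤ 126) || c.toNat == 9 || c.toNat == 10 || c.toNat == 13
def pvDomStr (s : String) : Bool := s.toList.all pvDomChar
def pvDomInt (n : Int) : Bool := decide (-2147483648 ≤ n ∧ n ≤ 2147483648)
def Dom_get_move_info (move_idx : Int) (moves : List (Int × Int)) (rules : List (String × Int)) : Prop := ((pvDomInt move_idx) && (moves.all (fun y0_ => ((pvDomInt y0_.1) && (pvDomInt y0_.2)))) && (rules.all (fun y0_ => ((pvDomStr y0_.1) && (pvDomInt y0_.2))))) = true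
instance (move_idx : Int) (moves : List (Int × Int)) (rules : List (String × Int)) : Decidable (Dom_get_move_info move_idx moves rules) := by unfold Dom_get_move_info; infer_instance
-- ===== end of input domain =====

-- B replaces A's move-by-move simulation loop (O(move_idx)) by closed-form divmod arithmetic (O(1));
-- equal on the natural rule domain stated in Pre_.

-- shared helper: first-match lookup in the association list standing for the Python dict (dict.get)
def pvLookup (rules : List (String × Int)) (k : String) : Option Int :=
  (rules.find? (fun p => p.1 == k)).map (·.2)

-- the loop body of A on the state (current_player, moves_remaining, turn)
def pvStepA (normal_stones : Int) (st : Int × Int × Int) : Int × Int × Int :=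
  let mr := st.2.1 - 1
  if mr = 0 then (3 - st.1, normal_stones, st.2.2 + 1) else (st.1, mr, st.2.2)

-- ===== PORT A =====
def get_move_info (move_idx : Int) (moves : List (Int × Int)) (rules : List (String × Int)) : List (String × Int) :=
  let moves_remaining := (pvLookup rules "first_turn_stones").getD 1
  let normal_stones := (pvLookup rules "normal_turn_stones").getD 2
  let st := (PySem.List.pyRange 0 move_idx 1).foldl (fun s _ => pvStepA normal_stones s)
              (1, moves_remaining, 1)
  let total := if st.2.2 = 1 then (pvLookup rules "first_turn_stones").getD 0 else normal_stones
  let sub := total - st.2.1 + 1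
  [("player", st.1), ("turn", st.2.2), ("sub_move", sub), ("total_sub_moves", total)]

-- ===== PORT B =====
def get_move_info_alt (move_idx : Int) (moves : List (Int × Int)) (rules : List (String × Int)) : List (String × Int) :=
  let first := (pvLookup rules "first_turn_stones").getD 1
  let normal := (pvLookup rules "normal_turn_stones").getD 2
  if move_idx < first then
    [("player", 1), ("turn", 1), ("sub_move", move_idx + 1), ("total_sub_moves", first)]
  else
    let q := PySem.Int.floordiv (move_idx - first) normal
    let s := PySem.Int.mod (move_idx - first) normal
    [("player", 2 - PySem.Int.mod q 2), ("turn", q + 2), ("sub_move", s + 1), ("total_sub_moves", normal)]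

-- ===== PRECONDITION & SPEC =====
-- Pre_ restricts to the natural domain of the game: a nonnegative move index, stone counts of at
-- least 1 (with the .get defaults), and "first_turn_stones" present whenever the result would still
-- be in turn 1 (otherwise A raises KeyError); outside it A returns accidental stuck-loop values or
-- raises, and B's divmod would divide by zero or floor-divide a negative count.
def Pre_get_move_info (move_idx : Int) (moves : List (Int × Int)) (rules : List (String × Int)) : Prop :=
  0 ≤ move_idx ∧ 1 ≤ (pvLookup rules "first_turn_stones").getD 1 ∧
    1 ≤ (pvLookup rules "normal_turn_stones").getD 2 ∧
    ((∃ p ∈ rules, p.1 = "first_turn_stones") ∨ 1 ≤ move_idx)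
instance (move_idx : Int) (moves : List (Int × Int)) (rules : List (String × Int)) : Decidable (Pre_get_move_info move_idx moves rules) := by unfold Pre_get_move_info; infer_instance

def pvWitness_get_move_info : Int × (List (Int × Int)) × (List (String × Int)) :=
  (5, [(0, 1)], [("first_turn_stones", 1), ("normal_turn_stones", 2)])

-- When 'first_turn_stones' is missing from rules and move_idx ≤ 0 (the result would still be in
-- turn 1), A raises KeyError; B returns the dict computed with the default first_turn_stones = 1.
def Raises_get_move_info (move_idx : Int) (moves : List (Int × Int)) (rules : List (String × Int)) : Prop :=
  (¬ ∃ p ∈ rules, p.1 = "first_turn_stones") ∧ move_idx ≤ 0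
instance (move_idx : Int) (moves : List (Int × Int)) (rules : List (String × Int)) : Decidable (Raises_get_move_info move_idx moves rules) := by unfold Raises_get_move_info; infer_instance

def pvRaiseWitness_get_move_info : Int × (List (Int × Int)) × (List (String × Int)) := (0, [], [])
def pvRaiseWitnessOut_get_move_info : List (String × Int) :=
  [("player", 1), ("turn", 1), ("sub_move", 1), ("total_sub_moves", 1)]

def Spec_get_move_info (move_idx : Int) (moves : List (Int × Int)) (rules : List (String × Int)) (out : List (String × Int)) : Prop := out = get_move_info_alt move_idx moves rules
instance (move_idx : Int) (moves : List (Int × Int)) (rules : List (String × Int)) (out : List (String × Int)) : Decidable (Spec_get_move_info move_idx moves rules out) := by unfold Spec_get_move_info; infer_instance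

-- ===== CLAIM (what is proved, stated in full; the proofs are below) =====
def Claim_equal_get_move_info : Prop := ∀ (move_idx : Int) (moves : List (Int × Int)) (rules : List (String × Int)), Dom_get_move_info move_idx moves rules → Pre_get_move_info move_idx moves rules → Spec_get_move_info move_idx moves rules (get_move_info move_idx moves rules)

def Claim_raises_get_move_info : Prop := (∀ (move_idx : Int) (moves : List (Int × Int)) (rules : List (String × Int)), Dom_get_move_info move_idx moves rules → Raises_get_move_info move_idx moves rules → ¬ Pre_get_move_info move_idx moves rules) ∧ (Dom_get_move_info (pvRaiseWitness_get_move_info.1) (pvRaiseWitness_get_move_info.2.1) (pvRaiseWitness_get_move_info.2.2) ∧ Raises_get_move_info (pvRaiseWitness_get_move_info.1) (pvRaiseWitness_get_move_info.2.1) (pvRaiseWitness_get_move_info.2.2) ∧ get_move_info_alt (pvRaiseWitness_get_move_info.1) (pvRaiseWitness_get_move_info.2.1) (pvRaiseWitness_get_move_info.2.2) = pvRaiseWitnessOut_get_move_info)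

-- ===== LEMMAS AND PROOFS =====

theorem pv_foldl_const {α β : Type} (l : List α) (g : β → β) (init : β) :
    l.foldl (fun s _ => g s) init = g^[l.length] init := by
  induction l generalizing init with
  | nil => rfl
  | cons x xs ih => rw [List.foldl_cons, ih, List.length_cons, Function.iterate_succ_apply]

theorem pv_loop1 (n f : Int) (k : Nat) (h : (k : Int) < f) :
    (pvStepA n)^[k] (1, f, 1) = (1, f - k, 1) := by
  induction k with
  | zero => simp
  | succ k ih =>
    have hk : (k : Int) < f := by omega
    rw [Function.iterate_succ_apply', ih hk]
    have hne : f - (k : Int) - 1 ≠ 0 := by omega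
    simp only [pvStepA, if_neg hne]
    have : f - (k : Int) - 1 = f - ((k : Nat) + 1 : Nat) := by push_cast; ring
    rw [this]

theorem pv_loop3 (n' : Nat) (hn : 0 < n') (r : Nat) :
    (pvStepA (n' : Int))^[r] (2, (n' : Int), 2) =
      ((if (r / n') % 2 = 0 then 2 else 1), (n' : Int) - ((r % n' : Nat) : Int), 2 + ((r / n' : Nat) : Int)) := by
  induction r with
  | zero => simp [Nat.mod_eq_of_lt hn, Nat.div_eq_of_lt hn]
  | succ r ih =>
    rw [Function.iterate_succ_apply', ih]
    by_cases hlast : r % n' = n' - 1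
    · have hdm := Nat.div_add_mod r n'
      have hmul : r + 1 = n' * (r / n' + 1) := by
        have h2 : n' * (r / n' + 1) = n' * (r / n') + n' := by ring
        rw [h2, hlast] at *
        generalize hX : n' * (r / n') = X at hdm ⊢
        omega
      have hmod : (r + 1) % n' = 0 := by
        rw [hmul]; exact Nat.mul_mod_right _ _
      have hdiv : (r + 1) / n' = r / n' + 1 := by
        rw [hmul]; exact Nat.mul_div_cancel_left _ hn
      have h1 : (n' : Int) - ((r % n' : Nat) : Int) - 1 = 0 := by
        rw [hlast]; push_cast [hn]; omega
      simp only [pvStepA, h1, hmod, hdiv]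
      refine Prod.ext ?_ (Prod.ext ?_ ?_)
      · simp only
        rcases Nat.even_or_odd (r / n') with he | ho
        · have h0 : (r / n') % 2 = 0 := Nat.even_iff.mp he
          have h1' : (r / n' + 1) % 2 = 1 := by omega
          simp [h0, h1']
        · have h0 : (r / n') % 2 = 1 := Nat.odd_iff.mp ho
          have h1' : (r / n' + 1) % 2 = 0 := by omega
          simp [h0, h1']
      · simp
      · simp only; push_cast; ring
    · have hlt : r % n' < n' - 1 := by have := Nat.mod_lt r hn; omega
      have hn2 : 2 ≤ n' := by omega
      have hmod : (r + 1) % n' = r % n' + 1 := by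
        conv_lhs => rw [Nat.add_mod]
        rw [Nat.mod_eq_of_lt hn2, Nat.mod_eq_of_lt (by omega)]
      have hdiv : (r + 1) / n' = r / n' := by
        rw [Nat.succ_div]
        have hnd : ¬ n' ∣ (r + 1) := by
          intro hd
          have h0 : (r + 1) % n' = 0 := Nat.dvd_iff_mod_eq_zero.mp hd
          omega
        simp [hnd]
      have h1 : (n' : Int) - ((r % n' : Nat) : Int) - 1 ≠ 0 := by push_cast; omega
      simp only [pvStepA, if_neg h1, hmod, hdiv]
      refine Prod.ext rfl (Prod.ext ?_ rfl)
      simp only; push_cast; ring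

theorem pv_main (move_idx : Int) (moves : List (Int × Int)) (rules : List (String × Int))
    (hpre : Pre_get_move_info move_idx moves rules) :
    get_move_info move_idx moves rules = get_move_info_alt move_idx moves rules := by
  obtain ⟨hmi, hf1, hn1, hkey⟩ := hpre
  unfold get_move_info get_move_info_alt
  set f := (pvLookup rules "first_turn_stones").getD 1 with hf
  set n := (pvLookup rules "normal_turn_stones").getD 2 with hn
  simp only []
  rw [pv_foldl_const, PySem.List.length_pyRange_one]
  simp only [sub_zero]
  set m : Nat := move_idx.toNat with hmdef
  have hmI : ((m : Nat) : Int) = move_idx := by omega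
  have hpresent : (∃ p ∈ rules, p.1 = "first_turn_stones") →
      (pvLookup rules "first_turn_stones").getD 0 = f := by
    rintro ⟨p, hp, hpk⟩
    have hsome : (rules.find? (fun p => p.1 == "first_turn_stones")).isSome := by
      rw [List.find?_isSome]; exact ⟨p, hp, by simp [hpk]⟩
    rcases Option.isSome_iff_exists.mp hsome with ⟨q, hq⟩
    rw [hf]; simp [pvLookup, hq]
  by_cases hlt : move_idx < f
  · -- still inside the first turn
    rw [pv_loop1 n f m (by omega)]
    have hpres : ∃ p ∈ rules, p.1 = "first_turn_stones" := by
      rcases hkey with h | h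
      · exact h
      · -- key absent would make f = 1 ≤ move_idx, contradicting move_idx < f
        by_contra habs
        have hfind : rules.find? (fun p => p.1 == "first_turn_stones") = none := by
          rw [List.find?_eq_none]
          intro p hp
          simp only [beq_iff_eq]
          intro hk
          exact habs ⟨p, hp, hk⟩
        have : f = 1 := by rw [hf]; simp [pvLookup, hfind]
        omega
    have htot := hpresent hpres
    simp only [htot, if_pos hlt]
    norm_num
    omega
  · push_neg at hlt
    have hsplit : m = (m - f.toNat) + f.toNat := by omega
    rw [hsplit, Function.iterate_add_apply]
    have hend1 : (pvStepA n)^[f.toNat] (1, f, 1) = (2, n, 2) := by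
      have hft : f.toNat = (f.toNat - 1) + 1 := by omega
      rw [hft, Function.iterate_succ_apply',
          pv_loop1 n f (f.toNat - 1) (by omega)]
      have hz : f - ((f.toNat - 1 : Nat) : Int) - 1 = 0 := by push_cast [hf1]; omega
      simp [pvStepA, hz]
    rw [hend1]
    set r : Nat := m - f.toNat with hrdef
    have hr : (r : Int) = move_idx - f := by push_cast; omega
    rw [if_neg (by omega : ¬ move_idx < f)]
    have hnn : n = ((n.toNat : Nat) : Int) := by omega
    set n' : Nat := n.toNat with hn'def
    have hn'pos : 0 < n' := by omega
    rw [hnn, pv_loop3 n' hn'pos r]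
    have hq : PySem.Int.floordiv (move_idx - f) ((n' : Nat) : Int) = ((r / n' : Nat) : Int) := by
      rw [PySem.Int.floordiv_eq_ediv_of_pos (by push_cast; omega), ← hr]
      exact Int.ofNat_ediv_ofNat
    have hs : PySem.Int.mod (move_idx - f) ((n' : Nat) : Int) = ((r % n' : Nat) : Int) := by
      rw [PySem.Int.mod_eq_emod_of_pos (by push_cast; omega), ← hr]
      exact Int.ofNat_mod_ofNat r n'
    have hq2 : PySem.Int.mod ((r / n' : Nat) : Int) 2 = (((r / n') % 2 : Nat) : Int) := by
      rw [PySem.Int.mod_eq_emod_of_pos (by norm_num)]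
      omega
    simp only [hq, hs, hq2]
    have hne : ¬ ((2 : Int) + ((r / n' : Nat) : Int) = 1) := by
      have h0 : (0 : Int) ≤ ((r / n' : Nat) : Int) := Int.natCast_nonneg _
      omega
    simp only [if_neg hne]
    have hsub : ((n' : Nat) : Int) - (((n' : Nat) : Int) - ((r % n' : Nat) : Int)) + 1 = ((r % n' : Nat) : Int) + 1 := by ring
    have hp2 : (if r / n' % 2 = 0 then (2 : Int) else 1) = 2 - ((r / n' % 2 : Nat) : Int) := by
      rcases Nat.mod_two_eq_zero_or_one (r / n') with h | h <;> rw [h] <;> norm_num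
    have hturn : (2 : Int) + ((r / n' : Nat) : Int) = ((r / n' : Nat) : Int) + 2 := by ring
    rw [hsub, hp2, hturn]

-- ===== VERDICT (by name: the statement is the Claim_ definition above) =====
theorem get_move_info_spec : Claim_equal_get_move_info := by
  intro move_idx moves rules _ hpre
  unfold Spec_get_move_info
  exact pv_main move_idx moves rules hpre

def get_move_info_raises : Claim_raises_get_move_info := by
  unfold Claim_raises_get_move_info
  refine ⟨?_, by decide, by decide, by decide⟩
  intro move_idx moves rules _ hr hpre
  obtain ⟨habs, hle⟩ := hr
  obtain ⟨hmi, -, -, hkey⟩ := hpre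
  rcases hkey with h | h
  · exact habs h
  · omega
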